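-- pv_equiv track=rewrite | github.com/thu-nics/DiTFastAttnV2 | ditfastattn_api/modules/dfa_processor_cogvideox.py | compute_raw_steps_residual_config
-- ===== SOURCE A (Python) =====
-- def compute_raw_steps_residual_config(steps_method):
--     steps_residual_config = []
--     # assert steps_method[0] == "raw", "The first step of DiTFastAttnProcessor must be raw"
--     for i, method in enumerate(steps_method):
--         residual_config = (False, None)
--         if "raw" in method:
--             for j in range(i + 1, len(steps_method)):
--                 if "residual_window_attn" in steps_method[j] and "without_residual" not in steps_method[j]:
--                     # If encountered a step that conduct WA-RS,
--                     # this step needs the residual computation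
--                     window_size = int(steps_method[j].split("_")[-1])
--                     residual_config = (True, (window_size // 2, window_size // 2))
--                     break
--                 if "raw" in steps_method[j]:
--                     # If encountered another step using the `full-attn` strategy,
--                     # this step doesn't need the residual computation
--                     break
--         steps_residual_config.append(residual_config)
--     return steps_residual_config
-- ===== SOURCE B (Python) =====
-- def compute_raw_steps_residual_config(steps_method):
--     # Single backward pass: next_cfg = what a raw step placed just before the
--     # current position would resolve to under A's forward scan.
--     out = []
--     next_cfg = (False, None)
--     for s in reversed(steps_method):
--         out.append(next_cfg if "raw" in s else (False, None))
--         if "residual_window_attn" in s and "without_residual" not in s: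
--             w = int(s.split("_")[-1])
--             next_cfg = (True, (w // 2, w // 2))
--         elif "raw" in s:
--             next_cfg = (False, None)
--     out.reverse()
--     return out
-- ===== Notes on version B (the rewrite author's own statement) =====
-- stated objective: alternative
-- what changed: Replaces A's nested forward scan (for each raw step, rescan the remaining steps to the next residual/raw step) by a single backward pass carrying next_cfg, the value a raw step at the current position would resolve to; measured cost is comparable since A's inner scan breaks early.
-- outside the precondition, e.g. on compute_raw_steps_residual_config(['residual_window_attn']): A returns [(False, None)], B raises ValueError; on compute_raw_steps_residual_config(['raw_residual_window_attn_x']): A returns [(False, None)], B raises ValueError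
import Mathlib
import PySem

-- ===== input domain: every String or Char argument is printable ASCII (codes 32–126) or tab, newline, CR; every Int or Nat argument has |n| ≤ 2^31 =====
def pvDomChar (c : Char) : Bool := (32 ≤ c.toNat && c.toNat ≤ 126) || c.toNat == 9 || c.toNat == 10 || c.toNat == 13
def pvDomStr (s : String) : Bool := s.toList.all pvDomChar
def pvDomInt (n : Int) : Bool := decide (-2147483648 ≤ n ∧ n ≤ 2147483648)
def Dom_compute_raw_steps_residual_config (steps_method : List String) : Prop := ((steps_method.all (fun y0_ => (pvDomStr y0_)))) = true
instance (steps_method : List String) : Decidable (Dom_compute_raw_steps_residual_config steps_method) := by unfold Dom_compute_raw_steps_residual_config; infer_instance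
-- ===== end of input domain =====

-- B replaces A's nested forward scan by a single backward pass carrying next_cfg (alternative decomposition).

-- ===== PORT A =====
-- shared helpers (both Pythons use these exact subexpressions)
-- "residual_window_attn" in s and "without_residual" not in s
def pvIsResidual (s : String) : Bool :=
  PySem.Str.isIn "residual_window_attn" s && !PySem.Str.isIn "without_residual" s

-- s.split("_")[-1]  (split on "_" is never empty, so pyGet? (-1) is always some; getD "" unused)
def pvLastSeg (s : String) : String :=
  (PySem.List.pyGet? ((PySem.Str.split? s "_").getD []) (-1)).getD ""

-- int(s.split("_")[-1])  — total form; the getD 0 is only reached outside Pre_ (Python raises ValueError there)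
def pvWin (s : String) : Int := (PySem.Int.ofStr? (pvLastSeg s)).getD 0

-- A's inner loop: scan the steps after position i (= the suffix `rest`) with break
def pvScanA : List String → Bool × Option (Int × Int)
  | [] => (false, none)
  | s :: rest =>
    if pvIsResidual s then
      (true, some (PySem.Int.floordiv (pvWin s) 2, PySem.Int.floordiv (pvWin s) 2))
    else if PySem.Str.isIn "raw" s then (false, none)
    else pvScanA rest

def compute_raw_steps_residual_config : List String → List (Bool × (Option (Int × Int)))
  | [] => []
  | m :: rest =>
    (if PySem.Str.isIn "raw" m then pvScanA rest else (false, none))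
      :: compute_raw_steps_residual_config rest

-- ===== PORT B =====
-- backward pass of Source B: returns (next_cfg after this suffix is processed, output for this suffix)
def pvBack : List String → ((Bool × Option (Int × Int)) × List (Bool × (Option (Int × Int))))
  | [] => ((false, none), [])
  | s :: rest =>
    let r := pvBack rest
    let here := if PySem.Str.isIn "raw" s then r.1 else (false, none)
    let nxt :=
      if pvIsResidual s then
        (true, some (PySem.Int.floordiv (pvWin s) 2, PySem.Int.floordiv (pvWin s) 2))
      else if PySem.Str.isIn "raw" s then (false, none)
      else r.1
    (nxt, here :: r.2)

def compute_raw_steps_residual_config_alt (steps_method : List String) : List (Bool × (Option (Int × Int))) :=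
  (pvBack steps_method).2

-- ===== PRECONDITION & SPEC =====
-- Pre_ excludes lists that contain a residual_window_attn step (without without_residual) whose
-- last "_"-segment is not int()-parseable: on such steps Python A raises ValueError whenever the
-- step is reachable from an earlier raw step, and B's eager backward parse raises there even when
-- A happens to return (the step is never scanned) — see cites.
def Pre_compute_raw_steps_residual_config (steps_method : List String) : Prop :=
  (steps_method.all (fun s => !pvIsResidual s || (PySem.Int.ofStr? (pvLastSeg s)).isSome)) = true
instance (steps_method : List String) : Decidable (Pre_compute_raw_steps_residual_config steps_method) := by
  unfold Pre_compute_raw_steps_residual_config; infer_instance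

def pvWitness_compute_raw_steps_residual_config : List String :=
  ["raw", "output_share", "residual_window_attn_4"]

def Spec_compute_raw_steps_residual_config (steps_method : List String) (out : List (Bool × (Option (Int × Int)))) : Prop := out = compute_raw_steps_residual_config_alt steps_method
instance (steps_method : List String) (out : List (Bool × (Option (Int × Int)))) : Decidable (Spec_compute_raw_steps_residual_config steps_method out) := by unfold Spec_compute_raw_steps_residual_config; infer_instance

-- ===== CLAIM (what is proved, stated in full; the proofs are below) =====
def Claim_equal_compute_raw_steps_residual_config : Prop := ∀ (steps_method : List String), Dom_compute_raw_steps_residual_config steps_method → Pre_compute_raw_steps_residual_config steps_method → Spec_compute_raw_steps_residual_config steps_method (compute_raw_steps_residual_config steps_method)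

-- ===== LEMMAS AND PROOFS =====
-- The carried next_cfg of the backward pass equals A's forward scan of the same suffix.
theorem pvBack_fst (l : List String) : (pvBack l).1 = pvScanA l := by
  induction l with
  | nil => rfl
  | cons s rest ih =>
    simp only [pvBack, pvScanA]
    split_ifs <;> simp [ih]

theorem pvBack_snd (l : List String) :
    (pvBack l).2 = compute_raw_steps_residual_config l := by
  induction l with
  | nil => rfl
  | cons s rest ih =>
    simp only [pvBack, compute_raw_steps_residual_config]
    split_ifs <;> simp [ih, pvBack_fst]

-- ===== VERDICT (by name: the statement is the Claim_ definition above) =====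
theorem compute_raw_steps_residual_config_spec : Claim_equal_compute_raw_steps_residual_config := by
  intro steps _ _
  unfold Spec_compute_raw_steps_residual_config compute_raw_steps_residual_config_alt
  exact (pvBack_snd steps).symm
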